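-- pv_equiv track=rewrite | github.com/AbdurrahmanAdni/Shape-Recognition | recognitor.py | getsisiSamaPanjang
-- ===== SOURCE A (Python) =====
-- import itertools
--
-- def getsisiSamaPanjang(myList):
--     counter = 0
--     combList = []
--     for L in range(0, len(myList)+1):
--         for subset in itertools.combinations(myList, L):
--             if(len(subset) == 2) :
--                 if (abs(subset[0] - subset[1]) <=2) :
--                     counter = counter + 1
--
--     if (counter == 2) :
--         return "pasangSisiSamaPanjang = 2"
--     elif (counter < 2) :
--         return "pasangSisiSamaPanjang < 2"
--     else:
--         return "/"
-- ===== SOURCE B (Python) =====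
-- def getsisiSamaPanjang(myList):
--     counter = 0
--     rest = myList
--     while rest:
--         x, rest = rest[0], rest[1:]
--         for y in rest:
--             if abs(x - y) <= 2:
--                 counter += 1
--                 if counter > 2:
--                     return "/"
--     if counter == 2:
--         return "pasangSisiSamaPanjang = 2"
--     return "pasangSisiSamaPanjang < 2"
-- ===== Notes on version B (the rewrite author's own statement) =====
-- stated objective: faster
-- what changed: Replaces the full power-set enumeration (itertools.combinations for every size L, filtering for size 2) with a direct double loop over index pairs that stops as soon as the count of near-equal pairs exceeds 2.
import Mathlib
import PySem

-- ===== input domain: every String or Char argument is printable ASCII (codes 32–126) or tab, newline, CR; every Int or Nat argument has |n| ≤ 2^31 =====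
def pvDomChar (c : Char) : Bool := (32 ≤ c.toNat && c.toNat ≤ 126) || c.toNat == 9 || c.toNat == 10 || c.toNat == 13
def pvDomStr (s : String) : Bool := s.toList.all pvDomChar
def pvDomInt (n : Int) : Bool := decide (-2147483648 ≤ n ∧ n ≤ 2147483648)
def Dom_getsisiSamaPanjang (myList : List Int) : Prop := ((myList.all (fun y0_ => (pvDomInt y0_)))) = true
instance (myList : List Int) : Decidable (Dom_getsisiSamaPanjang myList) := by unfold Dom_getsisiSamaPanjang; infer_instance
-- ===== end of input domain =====

-- B replaces A's power-set enumeration with a direct pair scan that stops early once the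
-- count exceeds 2 (objective: faster, O(n^2) instead of O(2^n)).

-- ===== PORT A =====
-- itertools.combinations(xs, n), in Python's emission order
def pvComb : Nat → List Int → List (List Int)
  | 0, _ => [[]]
  | _ + 1, [] => []
  | n + 1, x :: xs => (pvComb n xs).map (x :: ·) ++ pvComb (n + 1) xs

-- the body of A's inner loop: counter update for one subset
def pvStep (c : Nat) (subset : List Int) : Nat :=
  if subset.length == 2 then
    match PySem.List.pyGet? subset 0, PySem.List.pyGet? subset 1 with
    | some a, some b => if |a - b| ≤ 2 then c + 1 else c
    | _, _ => c
  else c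

def getsisiSamaPanjang (myList : List Int) : String :=
  let counter := (PySem.List.pyRange 0 (myList.length + 1) 1).foldl
      (fun c L => (pvComb L.toNat myList).foldl pvStep c) 0
  if counter == 2 then "pasangSisiSamaPanjang = 2"
  else if counter < 2 then "pasangSisiSamaPanjang < 2"
  else "/"

-- ===== PORT B =====
-- Source B's inner 'for y in rest' loop; none = the early 'return "/"'
def pvInner (x : Int) (ys : List Int) (c : Nat) : Option Nat :=
  match ys with
  | [] => some c
  | y :: t =>
      if |x - y| ≤ 2 then
        (if c + 1 > 2 then none else pvInner x t (c + 1))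
      else pvInner x t c

-- Source B's 'while rest' loop
def pvOuter : List Int → Nat → Option Nat
  | [], c => some c
  | x :: rest, c =>
      match pvInner x rest c with
      | none => none
      | some c' => pvOuter rest c'

def getsisiSamaPanjang_alt (myList : List Int) : String :=
  match pvOuter myList 0 with
  | none => "/"
  | some c => if c == 2 then "pasangSisiSamaPanjang = 2" else "pasangSisiSamaPanjang < 2"

-- ===== PRECONDITION & SPEC =====
def Spec_getsisiSamaPanjang (myList : List Int) (out : String) : Prop := out = getsisiSamaPanjang_alt myList
instance (myList : List Int) (out : String) : Decidable (Spec_getsisiSamaPanjang myList out) := by unfold Spec_getsisiSamaPanjang; infer_instance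

-- ===== CLAIM (what is proved, stated in full; the proofs are below) =====
def Claim_equal_getsisiSamaPanjang : Prop := ∀ (myList : List Int), Dom_getsisiSamaPanjang myList → Spec_getsisiSamaPanjang myList (getsisiSamaPanjang myList)

-- ===== LEMMAS AND PROOFS =====

-- the number of (i < j) pairs at distance ≤ 2: the common mathematical content
def pairCount : List Int → Nat
  | [] => 0
  | x :: xs => (xs.filter (fun y => |x - y| ≤ 2)).length + pairCount xs

theorem pvComb_length : ∀ (n : Nat) (xs : List Int), ∀ s ∈ pvComb n xs, s.length = n := by
  intro n
  induction n with
  | zero => intro xs s hs; simp [pvComb] at hs; simp [hs]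
  | succ n ih =>
      intro xs
      induction xs with
      | nil => intro s hs; simp [pvComb] at hs
      | cons x xs ihx =>
          intro s hs
          simp [pvComb] at hs
          rcases hs with ⟨t, ht, rfl⟩ | h
          · simp [ih xs t ht]
          · exact ihx s h

theorem pvStep_ne2 (c : Nat) (s : List Int) (h : s.length ≠ 2) : pvStep c s = c := by
  simp [pvStep, h]

theorem foldl_step_ne (l : List (List Int)) (h : ∀ s ∈ l, s.length ≠ 2) :
    ∀ c, l.foldl pvStep c = c := by
  induction l with
  | nil => intro c; rfl
  | cons s l ih =>
      intro c
      simp only [List.foldl_cons]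
      rw [pvStep_ne2 c s (h s (by simp))]
      exact ih (fun t ht => h t (by simp [ht])) c

theorem pvComb_one (xs : List Int) : pvComb 1 xs = xs.map (fun y => [y]) := by
  induction xs with
  | nil => rfl
  | cons x xs ih => simp [pvComb, ih]

theorem pvStep_pair (c : Nat) (a b : Int) :
    pvStep c [a, b] = if |a - b| ≤ 2 then c + 1 else c := by
  simp [pvStep, PySem.List.pyGet?, PySem.List.pyIdx?]

theorem foldl_pairs (x : Int) : ∀ (xs : List Int) (c : Nat),
    (xs.map (fun y => [x, y])).foldl pvStep c
      = c + (xs.filter (fun y => |x - y| ≤ 2)).length := by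
  intro xs
  induction xs with
  | nil => intro c; simp
  | cons y ys ih =>
      intro c
      simp only [List.map_cons, List.foldl_cons, pvStep_pair, List.filter_cons]
      by_cases h : |x - y| ≤ 2
      · simp [h, ih]; omega
      · simp [h, ih]

theorem comb2_fold : ∀ (xs : List Int) (c : Nat),
    (pvComb 2 xs).foldl pvStep c = c + pairCount xs := by
  intro xs
  induction xs with
  | nil => intro c; simp [pvComb, pairCount]
  | cons x xs ih =>
      intro c
      show ((pvComb 1 xs).map (x :: ·) ++ pvComb 2 xs).foldl pvStep c = _
      rw [List.foldl_append, pvComb_one, List.map_map]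
      have : ((fun t => x :: t) ∘ fun y => [y]) = fun y => [x, y] := rfl
      rw [this, foldl_pairs, ih, pairCount]
      omega

theorem outer_fold (xs : List Int) : ∀ (ls : List Int) (c : Nat),
    ls.foldl (fun c L => (pvComb L.toNat xs).foldl pvStep c) c
      = c + (ls.countP (fun L => L.toNat == 2)) * pairCount xs := by
  intro ls
  induction ls with
  | nil => intro c; simp
  | cons L ls ih =>
      intro c
      simp only [List.foldl_cons, List.countP_cons]
      by_cases h : L.toNat = 2
      · rw [h, comb2_fold, ih]
        simp [h, Nat.add_mul]
        omega
      · rw [foldl_step_ne _ (fun s hs => by rw [pvComb_length L.toNat xs s hs]; exact h), ih]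
        simp [h]

theorem pairCount_small (xs : List Int) (h : xs.length ≤ 1) : pairCount xs = 0 := by
  match xs with
  | [] => rfl
  | [x] => simp [pairCount]
  | x :: y :: t => simp at h

theorem countP_range2 : ∀ (m : Nat),
    List.countP (fun k => k == 2) (List.range m) = if 2 < m then 1 else 0 := by
  intro m
  induction m with
  | zero => decide
  | succ k ihk =>
      rw [List.range_succ, List.countP_append, ihk]
      by_cases h : 2 < k
      · have h' : (k == 2) = false := by simp; omega
        simp [h, h', Nat.lt_succ_of_lt h]
      · interval_cases k <;> decide

theorem countP_pyRange (n : Nat) :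
    ((PySem.List.pyRange 0 (n + 1) 1).countP (fun L => L.toNat == 2))
      = if 2 ≤ n then 1 else 0 := by
  rw [PySem.List.pyRange_one, List.countP_map]
  have h1 : ((n : Int) + 1 - 0).toNat = n + 1 := by omega
  rw [h1]
  have h2 : ((fun L : Int => L.toNat == 2) ∘ fun k : Nat => (0 : Int) + k)
      = fun k : Nat => k == 2 := by
    funext k; simp
  rw [h2, countP_range2]
  have : 2 < n + 1 ↔ 2 ≤ n := by omega
  simp [this]

theorem counterA_eq (xs : List Int) :
    (PySem.List.pyRange 0 (xs.length + 1) 1).foldl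
        (fun c L => (pvComb L.toNat xs).foldl pvStep c) 0 = pairCount xs := by
  rw [outer_fold, countP_pyRange]
  by_cases h : 2 ≤ xs.length
  · simp [h]
  · have := pairCount_small xs (by omega)
    simp [this]

theorem inner_spec (x : Int) : ∀ (ys : List Int) (c : Nat), c ≤ 2 →
    pvInner x ys c =
      (if 2 < c + (ys.filter (fun y => |x - y| ≤ 2)).length then none
       else some (c + (ys.filter (fun y => |x - y| ≤ 2)).length)) := by
  intro ys
  induction ys with
  | nil => intro c hc; simp [pvInner]; omega
  | cons y t ih =>
      intro c hc
      simp only [pvInner, List.filter_cons]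
      by_cases h : |x - y| ≤ 2
      · simp only [h, if_pos]
        by_cases h2 : c + 1 > 2
        · have : c = 2 := by omega
          simp [h2, this]
        · rw [if_neg h2, ih (c + 1) (by omega)]
          simp only [h, decide_true, List.length_cons]
          split <;> split <;> simp_all <;> omega
      · simp only [h, if_false]
        rw [ih c hc]
        simp [h]
  
theorem outer_spec : ∀ (l : List Int) (c : Nat), c ≤ 2 →
    pvOuter l c = (if 2 < c + pairCount l then none else some (c + pairCount l)) := by
  intro l
  induction l with
  | nil => intro c hc; simp [pvOuter, pairCount]; omega
  | cons x rest ih =>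
      intro c hc
      simp only [pvOuter]
      rw [inner_spec x rest c hc]
      by_cases h : 2 < c + (rest.filter (fun y => |x - y| ≤ 2)).length
      · simp only [h, if_pos]
        rw [if_pos]
        simp [pairCount]
        omega
      · rw [if_neg h]
        simp only []
        rw [ih _ (by omega)]
        simp only [pairCount, Nat.add_assoc]

-- ===== VERDICT (by name: the statement is the Claim_ definition above) =====
theorem getsisiSamaPanjang_spec : Claim_equal_getsisiSamaPanjang := by
  intro myList _
  unfold Spec_getsisiSamaPanjang getsisiSamaPanjang getsisiSamaPanjang_alt
  rw [counterA_eq, outer_spec myList 0 (by omega)]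
  simp only [Nat.zero_add]
  by_cases h3 : 2 < pairCount myList
  · rw [if_pos h3]
    have h2 : (pairCount myList == 2) = false := by simp; omega
    have h1 : ¬ pairCount myList < 2 := by omega
    simp [h2, h1]
  · rw [if_neg h3]
    by_cases h2 : pairCount myList = 2
    · simp [h2]
    · simp [h2]
      omega
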